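-- pv_equiv track=rewrite | github.com/YuSol-Oh/LLMs-Are-Making-You-Sick-Uncovering-the-Overpathologizing-Bias-in-Cognitive-Distortion-Detection | [Step0]_Data_Augmentation/CDD_to_Thought_Path_Data.py | remove_prefix_label
-- ===== SOURCE A (Python) =====
-- def remove_prefix_label(text: str) -> str:
--     lower = text.lower().strip()
--     prefixes = [
--         "situation",
--         "automatic thoughts",
--         "emotions",
--         "emotion",
--         "behaviors",
--         "behavior",
--     ]
--     for p in prefixes:
--         if lower.startswith(p + " :") or lower.startswith(p + ":"):
--             return text.split(":", 1)[-1].strip()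
--     return text.strip()
-- ===== SOURCE B (Python) =====
-- # A trie (prefix automaton) over the 12 accepted label-prefix patterns, walked
-- # once left-to-right over the lowered stripped text; no startswith scans.
-- _LABELS = ("situation", "automatic thoughts", "emotions", "emotion", "behaviors", "behavior")
-- _PATTERNS = [l + sep + ":" for l in _LABELS for sep in ("", " ")]
-- _TRANS = {}
-- for _pat in _PATTERNS:
--     _s = ""
--     for _ch in _pat:
--         _TRANS[(_s, _ch)] = _s + _ch
--         _s += _ch
-- _ACCEPT = frozenset(_PATTERNS)
--
--
-- def remove_prefix_label(text: str) -> str: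
--     state = ""
--     for ch in text.lower().strip():
--         state = _TRANS.get((state, ch))
--         if state is None:
--             return text.strip()
--         if state in _ACCEPT:
--             return text.split(":", 1)[-1].strip()
--     return text.strip()
-- ===== Notes on version B (the rewrite author's own statement) =====
-- stated objective: alternative
-- what changed: Replaces A's loop of twelve full startswith tests by a precomputed trie (prefix automaton) over the twelve accepted prefixes (each label with and without one trailing space, followed by a colon), walked once character by character over the lowered stripped text with early exit on mismatch or accept.
import Mathlib
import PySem

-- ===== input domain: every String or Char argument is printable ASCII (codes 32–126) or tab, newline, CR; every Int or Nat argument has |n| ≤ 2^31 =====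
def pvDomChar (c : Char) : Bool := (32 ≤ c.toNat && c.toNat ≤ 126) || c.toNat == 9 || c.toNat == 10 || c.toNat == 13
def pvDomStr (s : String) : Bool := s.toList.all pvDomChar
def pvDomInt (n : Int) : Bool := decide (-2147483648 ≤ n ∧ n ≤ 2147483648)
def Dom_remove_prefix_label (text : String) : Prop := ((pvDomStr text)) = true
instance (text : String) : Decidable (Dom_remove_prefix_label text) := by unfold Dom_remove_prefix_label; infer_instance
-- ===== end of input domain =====

-- B replaces A's loop of twelve full startswith tests by a precomputed trie
-- (prefix automaton) over the accepted label-prefix patterns, walked once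
-- character by character over the lowered stripped text (objective: alternative).

-- ===== PORT A =====
-- the `prefixes` local list of A
def pvPrefixes : List (List Char) :=
  ["situation".toList, "automatic thoughts".toList, "emotions".toList,
   "emotion".toList, "behaviors".toList, "behavior".toList]

-- the `for p in prefixes:` loop with its early return
def removePrefixLoop (t lower : List Char) : List (List Char) → List Char
  | [] => PySem.Chars.strip t
  | p :: ps =>
      if PySem.Chars.startswith lower (p ++ [' ', ':']) || PySem.Chars.startswith lower (p ++ [':']) then
        PySem.Chars.strip (PySem.List.pyGetD (PySem.Chars.splitOnMax t [':'] 1) (-1) [])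
      else removePrefixLoop t lower ps

def remove_prefix_label (text : String) : String :=
  String.ofList (removePrefixLoop text.toList
    (PySem.Chars.strip (PySem.Chars.lower text.toList)) pvPrefixes)

-- ===== PORT B =====
-- the `_PATTERNS` list of Source B: each label, with and without a trailing space, plus ':'
def pvPatterns : List (List Char) :=
  ["situation:".toList, "situation :".toList,
   "automatic thoughts:".toList, "automatic thoughts :".toList,
   "emotions:".toList, "emotions :".toList,
   "emotion:".toList, "emotion :".toList,
   "behaviors:".toList, "behaviors :".toList,
   "behavior:".toList, "behavior :".toList]

-- the inner `for _ch in _pat:` loop of Source B's trie construction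
def pvAddEdges (d : PySem.Dict (List Char × Char) (List Char)) (s : List Char) :
    List Char → PySem.Dict (List Char × Char) (List Char)
  | [] => d
  | ch :: rest => pvAddEdges (d.insert (s, ch) (s ++ [ch])) (s ++ [ch]) rest

-- the `_TRANS` dict of Source B
def pvTrans : PySem.Dict (List Char × Char) (List Char) :=
  pvPatterns.foldl (fun d pat => pvAddEdges d [] pat) PySem.Dict.empty

-- the `for ch in text.lower().strip():` walk of Source B with its early returns
def pvWalk (text state : List Char) : List Char → String
  | [] => String.ofList (PySem.Chars.strip text)
  | ch :: rest =>
      -- `state = _TRANS.get((state, ch)); if state is None: …` of Source B, via Option.elim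
      (pvTrans.get? (state, ch)).elim (String.ofList (PySem.Chars.strip text))
        (fun st =>
          if pvPatterns.contains st then
            String.ofList (PySem.Chars.strip (PySem.List.pyGetD (PySem.Chars.splitOnMax text [':'] 1) (-1) []))
          else pvWalk text st rest)

def remove_prefix_label_alt (text : String) : String :=
  pvWalk text.toList [] (PySem.Chars.strip (PySem.Chars.lower text.toList))

-- ===== PRECONDITION & SPEC =====
def Spec_remove_prefix_label (text : String) (out : String) : Prop := out = remove_prefix_label_alt text
instance (text : String) (out : String) : Decidable (Spec_remove_prefix_label text out) := by unfold Spec_remove_prefix_label; infer_instance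

-- ===== CLAIM (what is proved, stated in full; the proofs are below) =====
def Claim_equal_remove_prefix_label : Prop := ∀ (text : String), Dom_remove_prefix_label text → Spec_remove_prefix_label text (remove_prefix_label text)

-- ===== LEMMAS AND PROOFS =====

-- the trie stores the edge (w, ch) ↦ w ++ [ch] exactly when w ++ [ch] extends toward a pattern
lemma pvAddEdges_get? (rest : List Char) :
    ∀ (d : PySem.Dict (List Char × Char) (List Char)) (s w : List Char) (ch : Char),
      (pvAddEdges d s rest).get? (w, ch) =
        if s <+: w ∧ (w.drop s.length ++ [ch]) <+: rest then some (w ++ [ch])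
        else d.get? (w, ch) := by
  induction rest with
  | nil =>
      intro d s w ch
      simp [pvAddEdges]
  | cons c rest ih =>
      intro d s w ch
      rw [pvAddEdges, ih, PySem.Dict.get?_insert]
      by_cases hsw : s <+: w
      · obtain ⟨t, rfl⟩ := hsw
        cases t with
        | nil =>
            simp only [List.append_nil, List.drop_left, List.nil_append,
              List.cons_prefix_cons, List.prefix_nil]
            by_cases hc : ch = c
            · subst hc
              simp [List.prefix_iff_eq_take]
            · have h1 : ¬ (s ++ [c] <+: s) := by
                intro h
                have := h.length_le
                simp at this
              simp [hc, h1]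
        | cons c' t =>
            have hd1 : (s ++ c' :: t).drop s.length = c' :: t := List.drop_left ..
            have hd2 : (s ++ c' :: t).drop (s ++ [c]).length = t := by
              have : s ++ c' :: t = (s ++ [c']) ++ t := by simp
              rw [this]
              have hl : (s ++ [c]).length = (s ++ [c']).length := by simp
              rw [hl, List.drop_left]
            have hp : (s ++ [c] <+: s ++ c' :: t) ↔ c = c' := by
              rw [show s ++ c' :: t = s ++ ([c'] ++ t) by simp,
                List.prefix_append_right_inj]
              simp [List.cons_prefix_cons]
            have hne : (s ++ c' :: t, ch) ≠ (s, c) := by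
              intro h
              have := congrArg (fun p => p.1.length) h
              simp at this
            rw [hd1, hd2, if_neg hne]
            simp only [hp, List.cons_append, List.cons_prefix_cons]
            by_cases hc : c = c'
            · subst hc
              simp [List.prefix_append]
            · have hc' : ¬ c' = c := fun h => hc h.symm
              simp [hc, hc']
      · have h1 : ¬ (s ++ [c] <+: w) := fun h => hsw ((s.prefix_append [c]).trans h)
        have hne : (w, ch) ≠ (s, c) := by
          rintro ⟨rfl, rfl⟩
          exact hsw List.prefix_rfl
        simp [hsw, h1, hne]

lemma foldl_addEdges_get? (P : List (List Char)) :
    ∀ (d : PySem.Dict (List Char × Char) (List Char)) (w : List Char) (ch : Char),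
      (P.foldl (fun d pat => pvAddEdges d [] pat) d).get? (w, ch) =
        if ∃ pat ∈ P, (w ++ [ch]) <+: pat then some (w ++ [ch]) else d.get? (w, ch) := by
  induction P with
  | nil => intro d w ch; simp
  | cons pat P ih =>
      intro d w ch
      rw [List.foldl_cons, ih, pvAddEdges_get?]
      simp only [List.nil_prefix, List.drop_zero, true_and, List.mem_cons, exists_eq_or_imp]
      split_ifs <;> simp_all <;> tauto

lemma pvTrans_get? (w : List Char) (ch : Char) :
    pvTrans.get? (w, ch) =
      if ∃ pat ∈ pvPatterns, (w ++ [ch]) <+: pat then some (w ++ [ch]) else none := by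
  rw [pvTrans, foldl_addEdges_get?]
  rfl

-- condition: some pattern equals state ++ (a prefix of rest)
def pvCond (state rest : List Char) : Bool :=
  pvPatterns.any (fun pat => state.isPrefixOf pat && (pat.drop state.length).isPrefixOf rest)

lemma pvCond_iff (state rest : List Char) :
    pvCond state rest = true ↔
      ∃ pat ∈ pvPatterns, state <+: pat ∧ pat.drop state.length <+: rest := by
  simp [pvCond, List.any_eq_true, List.isPrefixOf_iff_prefix]

lemma pvWalk_nil (text state : List Char) :
    pvWalk text state [] = String.ofList (PySem.Chars.strip text) := rfl

lemma pvWalk_cons_none (text state : List Char) (ch : Char) (rest : List Char)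
    (h : pvTrans.get? (state, ch) = none) :
    pvWalk text state (ch :: rest) = String.ofList (PySem.Chars.strip text) := by
  rw [pvWalk, h]
  rfl

lemma pvWalk_cons_some (text state : List Char) (ch : Char) (rest : List Char) (st : List Char)
    (h : pvTrans.get? (state, ch) = some st) :
    pvWalk text state (ch :: rest) =
      if pvPatterns.contains st then
        String.ofList (PySem.Chars.strip (PySem.List.pyGetD (PySem.Chars.splitOnMax text [':'] 1) (-1) []))
      else pvWalk text st rest := by
  rw [pvWalk, h]
  rfl

lemma pvWalk_eq (text : List Char) (rest : List Char) :
    ∀ state, state ∉ pvPatterns →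
      pvWalk text state rest =
        if pvCond state rest then
          String.ofList (PySem.Chars.strip (PySem.List.pyGetD (PySem.Chars.splitOnMax text [':'] 1) (-1) []))
        else String.ofList (PySem.Chars.strip text) := by
  induction rest with
  | nil =>
      intro state hs
      have hc : pvCond state [] = false := by
        rw [Bool.eq_false_iff, Ne, pvCond_iff]
        rintro ⟨pat, hpat, ⟨t, rfl⟩, hdrop⟩
        rw [List.drop_left, List.prefix_nil] at hdrop
        subst hdrop
        rw [List.append_nil] at hpat
        exact hs hpat
      rw [pvWalk_nil, hc]
      rfl
  | cons ch rest ih =>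
      intro state hs
      by_cases hT : ∃ pat ∈ pvPatterns, (state ++ [ch]) <+: pat
      · have hsome : pvTrans.get? (state, ch) = some (state ++ [ch]) := by
          rw [pvTrans_get?, if_pos hT]
        rw [pvWalk_cons_some text state ch rest _ hsome]
        by_cases hA : (state ++ [ch]) ∈ pvPatterns
        · have hcont : pvPatterns.contains (state ++ [ch]) = true := by
            simpa [List.contains_iff_mem] using hA
          have hc : pvCond state (ch :: rest) = true := by
            rw [pvCond_iff]
            exact ⟨state ++ [ch], hA, ⟨[ch], rfl⟩, by rw [List.drop_left]; exact ⟨rest, rfl⟩⟩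
          rw [if_pos hcont, hc]
          rfl
        · have hcont : ¬ (pvPatterns.contains (state ++ [ch]) = true) := by
            simpa [List.contains_iff_mem] using hA
          rw [if_neg hcont, ih (state ++ [ch]) hA]
          have hc : pvCond state (ch :: rest) = pvCond (state ++ [ch]) rest := by
            rw [Bool.eq_iff_iff, pvCond_iff, pvCond_iff]
            constructor
            · rintro ⟨pat, hpat, ⟨t, rfl⟩, hdrop⟩
              rw [List.drop_left] at hdrop
              cases t with
              | nil =>
                  rw [List.append_nil] at hpat
                  exact absurd hpat hs
              | cons c' t =>
                  rw [List.cons_prefix_cons] at hdrop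
                  obtain ⟨hce, ht⟩ := hdrop
                  refine ⟨state ++ c' :: t, hpat, ⟨t, by simp [hce]⟩, ?_⟩
                  have he : state ++ c' :: t = (state ++ [ch]) ++ t := by simp [hce]
                  rw [he, List.drop_left]
                  exact ht
            · rintro ⟨pat, hpat, ⟨t, rfl⟩, hdrop⟩
              rw [List.drop_left] at hdrop
              refine ⟨(state ++ [ch]) ++ t, hpat, ⟨ch :: t, by simp⟩, ?_⟩
              have he : (state ++ [ch]) ++ t = state ++ (ch :: t) := by simp
              rw [he, List.drop_left, List.cons_prefix_cons]
              exact ⟨rfl, hdrop⟩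
          rw [hc]
      · have hnone : pvTrans.get? (state, ch) = none := by
          rw [pvTrans_get?, if_neg hT]
        rw [pvWalk_cons_none text state ch rest hnone]
        have hc : pvCond state (ch :: rest) = false := by
          rw [Bool.eq_false_iff, Ne, pvCond_iff]
          rintro ⟨pat, hpat, ⟨t, rfl⟩, hdrop⟩
          rw [List.drop_left] at hdrop
          cases t with
          | nil =>
              rw [List.append_nil] at hpat
              exact absurd hpat hs
          | cons c' t =>
              rw [List.cons_prefix_cons] at hdrop
              obtain ⟨hce, -⟩ := hdrop
              exact hT ⟨state ++ c' :: t, hpat, ⟨t, by simp [hce]⟩⟩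
        rw [hc]
        rfl

-- A's loop returns the split value iff some prefix matches
lemma removePrefixLoop_eq (t lower : List Char) (ps : List (List Char)) :
    removePrefixLoop t lower ps =
      if ps.any (fun p => PySem.Chars.startswith lower (p ++ [' ', ':']) || PySem.Chars.startswith lower (p ++ [':'])) then
        PySem.Chars.strip (PySem.List.pyGetD (PySem.Chars.splitOnMax t [':'] 1) (-1) [])
      else PySem.Chars.strip t := by
  induction ps with
  | nil => simp [removePrefixLoop]
  | cons p ps ih =>
      cases h : (PySem.Chars.startswith lower (p ++ [' ', ':']) || PySem.Chars.startswith lower (p ++ [':'])) <;>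
        simp [removePrefixLoop, h, ih]

-- A's condition ↔ B's root condition
lemma anyA_eq_cond (lo : List Char) :
    (pvPrefixes.any fun p => PySem.Chars.startswith lo (p ++ [' ', ':']) || PySem.Chars.startswith lo (p ++ [':'])) =
      pvCond [] lo := by
  rw [Bool.eq_iff_iff, pvCond_iff]
  simp only [List.any_eq_true, Bool.or_eq_true, PySem.Chars.startswith_iff,
    List.nil_prefix, List.drop_zero, true_and]
  constructor
  · rintro ⟨p, hp, h | h⟩
    · exact ⟨p ++ [' ', ':'], by fin_cases hp <;> decide, h⟩
    · exact ⟨p ++ [':'], by fin_cases hp <;> decide, h⟩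
  · rintro ⟨pat, hpat, h⟩
    have hex : ∃ p, p ∈ pvPrefixes ∧ (pat = p ++ [' ', ':'] ∨ pat = p ++ [':']) := by
      fin_cases hpat <;> decide
    obtain ⟨p, hp, rfl | rfl⟩ := hex
    · exact ⟨p, hp, Or.inl h⟩
    · exact ⟨p, hp, Or.inr h⟩

-- ===== VERDICT (by name: the statement is the Claim_ definition above) =====
theorem remove_prefix_label_spec : Claim_equal_remove_prefix_label := by
  intro text _
  unfold Spec_remove_prefix_label remove_prefix_label remove_prefix_label_alt
  rw [removePrefixLoop_eq, pvWalk_eq _ _ [] (by decide), ← anyA_eq_cond, apply_ite String.ofList]
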